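-- pv_equiv track=rewrite | github.com/Sh-Anand/Fast-Generalized-Floyd-Warshall | generator/writer.py | generate_phase_2_innermost_loop
-- ===== SOURCE A (Python) =====
-- indent8 = "                                "
--
-- indent9 = "                                    "
--
-- counter = 4
--
-- ops = [["_mm256_add_pd", "_mm256_min_pd"], ["_mm256_min_pd", "_mm256_max_pd"]]
--
-- def generate_phase_2_innermost_loop(unroll, op):
--     phase_2_body = ""
--     for i in range(unroll):
--         id = str(i)
--         phase_2_body = phase_2_body + indent8 + "jpm"+id+" = (jp + sub_base_m + "+str(i*counter)+"); iplnjpm" +id+"= ipln + jpm"+id+"; Bkj"+id+"=B + kln + jpm"+id+";\n"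
--
--     phase_2_body = phase_2_body + "\n" + indent8 + "for(; jp <= j + Bj - "+str(unroll*counter)+"; jp += "+str(unroll*counter)+") {\n"
--
--     for i in range(unroll):
--         id = str(i)
--         phase_2_body = phase_2_body + indent9 + "b_v"+id+" = _mm256_load_pd(Bkj"+id+");\n"
--
--     for i in range(unroll):
--         id = str(i)
--         phase_2_body = phase_2_body + indent9 + "c_v"+id+" = _mm256_load_pd(C + iplnjpm"+id+");\n"
--
--     for i in range(unroll):
--         id = str(i)
--         phase_2_body = phase_2_body + indent9 + "apb_v"+id+" = "+ops[op][0]+"(a_v, b_v"+id+");\n"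
--
--     for i in range(unroll):
--         id = str(i)
--         phase_2_body = phase_2_body + indent9 + "res"+id+" = "+ops[op][1]+"(c_v"+id+", apb_v"+id+");\n"
--
--     for i in range(unroll):
--         id = str(i)
--         phase_2_body = phase_2_body + indent9 + "_mm256_store_pd(C + iplnjpm"+id+", res"+id+");\n"
--
--     for i in range(unroll):
--         id = str(i)
--         phase_2_body = phase_2_body + indent9 + "iplnjpm"+id+" += "+str(unroll*counter)+";\n"
--
--     for i in range(unroll):
--         id = str(i)
--         phase_2_body = phase_2_body + indent9 + "Bkj"+id+" += "+str(unroll*counter)+";\n"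
--
--     phase_2_body = phase_2_body + indent8 + "}\n"
--     return phase_2_body
-- ===== SOURCE B (Python) =====
-- indent8 = "                                "
--
-- indent9 = "                                    "
--
-- counter = 4
--
-- ops = [["_mm256_add_pd", "_mm256_min_pd"], ["_mm256_min_pd", "_mm256_max_pd"]]
--
-- def generate_phase_2_innermost_loop(unroll, op):
--     step = str(unroll * counter)
--     prefix = []
--     rows = []
--     for i in range(unroll):
--         id = str(i)
--         prefix.append(indent8 + "jpm" + id + " = (jp + sub_base_m + " + str(i * counter) + "); iplnjpm" + id + "= ipln + jpm" + id + "; Bkj" + id + "=B + kln + jpm" + id + ";\n")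
--         rows.append([
--             "b_v" + id + " = _mm256_load_pd(Bkj" + id + ");",
--             "c_v" + id + " = _mm256_load_pd(C + iplnjpm" + id + ");",
--             "apb_v" + id + " = " + ops[op][0] + "(a_v, b_v" + id + ");",
--             "res" + id + " = " + ops[op][1] + "(c_v" + id + ", apb_v" + id + ");",
--             "_mm256_store_pd(C + iplnjpm" + id + ", res" + id + ");",
--             "iplnjpm" + id + " += " + step + ";",
--             "Bkj" + id + " += " + step + ";",
--         ])
--     body = [indent9 + line + "\n" for col in zip(*rows) for line in col]
--     return ("".join(prefix)
--             + "\n" + indent8 + "for(; jp <= j + Bj - " + step + "; jp += " + step + ") {\n"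
--             + "".join(body)
--             + indent8 + "}\n")
-- ===== Notes on version B (the rewrite author's own statement) =====
-- stated objective: alternative
-- what changed: B builds a per-index matrix of the seven body lines in one pass over i and emits it column-major via a zip(*rows) transpose joined once, instead of A's seven separate string-accumulating passes each re-iterating range(unroll).
-- outside the precondition, e.g. on generate_phase_2_innermost_loop(1, 5): A raises IndexError, B raises IndexError
import Mathlib
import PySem

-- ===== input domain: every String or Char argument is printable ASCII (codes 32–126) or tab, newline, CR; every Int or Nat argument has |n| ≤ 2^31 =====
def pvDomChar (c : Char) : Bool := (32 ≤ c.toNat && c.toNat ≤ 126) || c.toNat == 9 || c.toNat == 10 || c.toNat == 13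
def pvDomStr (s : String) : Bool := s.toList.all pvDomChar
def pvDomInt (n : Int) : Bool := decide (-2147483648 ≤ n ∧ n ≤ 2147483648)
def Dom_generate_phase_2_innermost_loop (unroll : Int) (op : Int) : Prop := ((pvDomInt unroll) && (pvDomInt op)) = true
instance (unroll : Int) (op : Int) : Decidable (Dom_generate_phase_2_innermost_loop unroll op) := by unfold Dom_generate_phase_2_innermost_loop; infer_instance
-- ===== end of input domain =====

-- B builds, in a single pass over i, a per-index matrix of the seven body lines and emits it
-- column-major via a zip(*rows) transpose with one final join, instead of A's seven separate
-- string-accumulating passes (objective: alternative decomposition, same cost).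

def pvIndent8 : String := "                                "
def pvIndent9 : String := "                                    "
def pvOps : List (List String) := [["_mm256_add_pd", "_mm256_min_pd"], ["_mm256_min_pd", "_mm256_max_pd"]]

-- ===== PORT A =====
def generate_phase_2_innermost_loop (unroll : Int) (op : Int) : String :=
  let b1 := (PySem.List.pyRange 0 unroll 1).foldl (fun acc i =>
    acc ++ pvIndent8 ++ "jpm" ++ PySem.Int.toStr i ++ " = (jp + sub_base_m + " ++ PySem.Int.toStr (i * 4) ++ "); iplnjpm" ++ PySem.Int.toStr i ++ "= ipln + jpm" ++ PySem.Int.toStr i ++ "; Bkj" ++ PySem.Int.toStr i ++ "=B + kln + jpm" ++ PySem.Int.toStr i ++ ";\n") ""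
  let b2 := b1 ++ "\n" ++ pvIndent8 ++ "for(; jp <= j + Bj - " ++ PySem.Int.toStr (unroll * 4) ++ "; jp += " ++ PySem.Int.toStr (unroll * 4) ++ ") {\n"
  let b3 := (PySem.List.pyRange 0 unroll 1).foldl (fun acc i =>
    acc ++ pvIndent9 ++ "b_v" ++ PySem.Int.toStr i ++ " = _mm256_load_pd(Bkj" ++ PySem.Int.toStr i ++ ");\n") b2
  let b4 := (PySem.List.pyRange 0 unroll 1).foldl (fun acc i =>
    acc ++ pvIndent9 ++ "c_v" ++ PySem.Int.toStr i ++ " = _mm256_load_pd(C + iplnjpm" ++ PySem.Int.toStr i ++ ");\n") b3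
  let b5 := (PySem.List.pyRange 0 unroll 1).foldl (fun acc i =>
    acc ++ pvIndent9 ++ "apb_v" ++ PySem.Int.toStr i ++ " = " ++ PySem.List.pyGetD (PySem.List.pyGetD pvOps op []) 0 "" ++ "(a_v, b_v" ++ PySem.Int.toStr i ++ ");\n") b4
  let b6 := (PySem.List.pyRange 0 unroll 1).foldl (fun acc i =>
    acc ++ pvIndent9 ++ "res" ++ PySem.Int.toStr i ++ " = " ++ PySem.List.pyGetD (PySem.List.pyGetD pvOps op []) 1 "" ++ "(c_v" ++ PySem.Int.toStr i ++ ", apb_v" ++ PySem.Int.toStr i ++ ");\n") b5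
  let b7 := (PySem.List.pyRange 0 unroll 1).foldl (fun acc i =>
    acc ++ pvIndent9 ++ "_mm256_store_pd(C + iplnjpm" ++ PySem.Int.toStr i ++ ", res" ++ PySem.Int.toStr i ++ ");\n") b6
  let b8 := (PySem.List.pyRange 0 unroll 1).foldl (fun acc i =>
    acc ++ pvIndent9 ++ "iplnjpm" ++ PySem.Int.toStr i ++ " += " ++ PySem.Int.toStr (unroll * 4) ++ ";\n") b7
  let b9 := (PySem.List.pyRange 0 unroll 1).foldl (fun acc i =>
    acc ++ pvIndent9 ++ "Bkj" ++ PySem.Int.toStr i ++ " += " ++ PySem.Int.toStr (unroll * 4) ++ ";\n") b8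
  b9 ++ pvIndent8 ++ "}\n"

-- ===== PORT B =====
-- Exact port of Python's zip(*rows) on lists of strings: stops at the shortest row,
-- and zip() of no rows is empty — both matched by the isEmpty tests below.
def pvZipStar (rows : List (List String)) : List (List String) :=
  if h : rows.isEmpty || rows.any (·.isEmpty) then []
  else (rows.map fun r => r.headD "") :: pvZipStar (rows.map (·.tail))
termination_by (rows.headD []).length
decreasing_by
  simp only [Bool.or_eq_true, not_or, List.isEmpty_iff, List.any_eq_true, not_exists] at h
  obtain ⟨hne, hrow⟩ := h
  cases rows with
  | nil => exact absurd rfl hne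
  | cons r rs =>
    have hr : r ≠ [] := fun he => hrow r ⟨List.mem_cons_self, he⟩
    simp only [List.headD_cons]
    cases r with
    | nil => exact absurd rfl hr
    | cons x xs => simp

def generate_phase_2_innermost_loop_alt (unroll : Int) (op : Int) : String :=
  let step := PySem.Int.toStr (unroll * 4)
  let pr := (PySem.List.pyRange 0 unroll 1).foldl (fun (acc : List String × List (List String)) i =>
    (acc.1 ++ [pvIndent8 ++ "jpm" ++ PySem.Int.toStr i ++ " = (jp + sub_base_m + " ++ PySem.Int.toStr (i * 4) ++ "); iplnjpm" ++ PySem.Int.toStr i ++ "= ipln + jpm" ++ PySem.Int.toStr i ++ "; Bkj" ++ PySem.Int.toStr i ++ "=B + kln + jpm" ++ PySem.Int.toStr i ++ ";\n"],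
     acc.2 ++ [[
       "b_v" ++ PySem.Int.toStr i ++ " = _mm256_load_pd(Bkj" ++ PySem.Int.toStr i ++ ");",
       "c_v" ++ PySem.Int.toStr i ++ " = _mm256_load_pd(C + iplnjpm" ++ PySem.Int.toStr i ++ ");",
       "apb_v" ++ PySem.Int.toStr i ++ " = " ++ PySem.List.pyGetD (PySem.List.pyGetD pvOps op []) 0 "" ++ "(a_v, b_v" ++ PySem.Int.toStr i ++ ");",
       "res" ++ PySem.Int.toStr i ++ " = " ++ PySem.List.pyGetD (PySem.List.pyGetD pvOps op []) 1 "" ++ "(c_v" ++ PySem.Int.toStr i ++ ", apb_v" ++ PySem.Int.toStr i ++ ");",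
       "_mm256_store_pd(C + iplnjpm" ++ PySem.Int.toStr i ++ ", res" ++ PySem.Int.toStr i ++ ");",
       "iplnjpm" ++ PySem.Int.toStr i ++ " += " ++ step ++ ";",
       "Bkj" ++ PySem.Int.toStr i ++ " += " ++ step ++ ";"]])) ([], [])
  let body := (pvZipStar pr.2).flatMap (fun col => col.map (fun line => pvIndent9 ++ line ++ "\n"))
  PySem.Str.join "" pr.1 ++ "\n" ++ pvIndent8 ++ "for(; jp <= j + Bj - " ++ step ++ "; jp += " ++ step ++ ") {\n"
    ++ PySem.Str.join "" body ++ pvIndent8 ++ "}\n"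

-- ===== PRECONDITION & SPEC =====
-- Pre_ excludes exactly the inputs where the Python A raises IndexError: unroll ≥ 1 with op outside
-- the valid (Python, possibly negative) index range of the 2-element ops table.
def Pre_generate_phase_2_innermost_loop (unroll : Int) (op : Int) : Prop :=
  unroll ≤ 0 ∨ (-2 ≤ op ∧ op ≤ 1)
instance (unroll : Int) (op : Int) : Decidable (Pre_generate_phase_2_innermost_loop unroll op) := by
  unfold Pre_generate_phase_2_innermost_loop; infer_instance

def pvWitness_generate_phase_2_innermost_loop : Int × Int := (2, 0)

def Spec_generate_phase_2_innermost_loop (unroll : Int) (op : Int) (out : String) : Prop := out = generate_phase_2_innermost_loop_alt unroll op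
instance (unroll : Int) (op : Int) (out : String) : Decidable (Spec_generate_phase_2_innermost_loop unroll op out) := by unfold Spec_generate_phase_2_innermost_loop; infer_instance

-- ===== CLAIM (what is proved, stated in full; the proofs are below) =====
def Claim_equal_generate_phase_2_innermost_loop : Prop := ∀ (unroll : Int) (op : Int), Dom_generate_phase_2_innermost_loop unroll op → Pre_generate_phase_2_innermost_loop unroll op → Spec_generate_phase_2_innermost_loop unroll op (generate_phase_2_innermost_loop unroll op)

-- ===== LEMMAS AND PROOFS =====

lemma pv_chars_join_nil_sep (l : List (List Char)) : PySem.Chars.join [] l = l.flatten := by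
  simp only [PySem.Chars.join, List.intercalate]
  induction l with
  | nil => rfl
  | cons x xs ih =>
    cases xs with
    | nil => simp
    | cons y ys => simp_all [List.intersperse]

lemma pv_join_empty_eq (l : List String) : PySem.Str.join "" l = l.foldr (· ++ ·) "" := by
  induction l with
  | nil => rfl
  | cons x xs ih =>
    apply String.toList_inj.mp
    rw [List.foldr_cons, String.toList_append, ← ih]
    simp [PySem.Str.join, pv_chars_join_nil_sep]

lemma pv_cat_append (l1 l2 : List String) :
    (l1 ++ l2).foldr (· ++ ·) "" = l1.foldr (· ++ ·) "" ++ l2.foldr (· ++ ·) "" := by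
  induction l1 with
  | nil => simp
  | cons x xs ih => simp [ih, String.append_assoc]

lemma pv_foldl_str (l : List Int) (f : Int → String) (s : String) :
    List.foldl (fun acc i => acc ++ f i) s l = s ++ (l.map f).foldr (· ++ ·) "" := by
  induction l generalizing s with
  | nil => simp
  | cons a t ih => simp [ih, String.append_assoc]

lemma pv_foldl_pair (l : List Int) (f : Int → String) (g : Int → List String)
    (a : List String) (b : List (List String)) :
    List.foldl (fun (acc : List String × List (List String)) i => (acc.1 ++ [f i], acc.2 ++ [g i])) (a, b) l
      = (a ++ l.map f, b ++ l.map g) := by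
  induction l generalizing a b with
  | nil => simp
  | cons x xs ih => simp [ih]

lemma pv_zipStar_map_cons (l : List Int) (hl : l ≠ []) (f : Int → String) (fs : Int → List String) :
    pvZipStar (l.map fun i => f i :: fs i) = l.map f :: pvZipStar (l.map fs) := by
  rw [pvZipStar]
  have h1 : ¬ (((l.map fun i => f i :: fs i).isEmpty || (l.map fun i => f i :: fs i).any (·.isEmpty)) = true) := by
    simp [hl]
  rw [dif_neg h1]
  simp only [List.map_map, Function.comp_def, List.headD_cons, List.tail_cons]

lemma pv_zipStar_map_nil (l : List Int) : pvZipStar (l.map fun _ => ([] : List String)) = [] := by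
  rw [pvZipStar]
  cases l with
  | nil => simp
  | cons x xs => rw [dif_pos (by simp)]

lemma pv_merge_close : (");" : String) ++ "\n" = ");\n" := rfl
lemma pv_merge_semi : (";" : String) ++ "\n" = ";\n" := rfl

-- ===== VERDICT (by name: the statement is the Claim_ definition above) =====
theorem generate_phase_2_innermost_loop_spec : Claim_equal_generate_phase_2_innermost_loop := by
  intro unroll op _ _
  unfold Spec_generate_phase_2_innermost_loop
  unfold generate_phase_2_innermost_loop generate_phase_2_innermost_loop_alt
  simp only []
  rw [pv_foldl_pair]
  simp only [List.nil_append]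
  by_cases hl : PySem.List.pyRange 0 unroll 1 = []
  · rw [hl]
    simp only [List.map_nil, List.foldl_nil]
    rw [pvZipStar]
    simp [pv_join_empty_eq, String.append_assoc]
  · rw [pv_zipStar_map_cons _ hl, pv_zipStar_map_cons _ hl, pv_zipStar_map_cons _ hl,
      pv_zipStar_map_cons _ hl, pv_zipStar_map_cons _ hl, pv_zipStar_map_cons _ hl,
      pv_zipStar_map_cons _ hl, pv_zipStar_map_nil]
    simp only [List.flatMap_cons, List.flatMap_nil, List.append_nil, List.map_map,
      Function.comp_def]
    simp only [String.append_assoc]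
    rw [pv_foldl_str, pv_foldl_str, pv_foldl_str, pv_foldl_str, pv_foldl_str, pv_foldl_str,
      pv_foldl_str, pv_foldl_str]
    simp only [pv_join_empty_eq, pv_cat_append, String.append_assoc, String.empty_append,
      pv_merge_close, pv_merge_semi]
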